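-- pv_equiv track=rewrite | github.com/frymash/NUS-CS1010X | past_year_papers/PE/2022_rePE/re-PE-template-1.py | make_diamond_matrix
-- ===== SOURCE A (Python) =====
-- def make_diamond_matrix(m,n):
--     """ (int, int) -> Matrix
--     """
--     result = []
--     if n % 2 != 0:
--         to_add = [i for i in range(n//2+1)]
--         to_add += to_add[-2::-1]
--     else:
--         to_add = [i for i in range(n//2)]
--         to_add += to_add[-1::-1]
--
--     # Develop the matrix until the m//2th row
--     for _ in range(m//2+1):
--         result.append(to_add)
--         to_add = list(map(lambda x: x+1, to_add))
--
--     # Complete the matrix by adding rows in reverse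
--     if m % 2 == 0:
--         result.pop()
--         for sublist in result[-1::-1]:
--             result.append(sublist)
--     else:
--         for sublist in result[-2::-1]:
--             result.append(sublist)
--     return result
-- ===== SOURCE B (Python) =====
-- def _pattern(k):
--     """Palindromic distance pattern of length max(k, 0): 0,1,...,peak,...,1,0."""
--     if k % 2 != 0:
--         half = list(range(k // 2 + 1))
--         return half + half[-2::-1]
--     half = list(range(k // 2))
--     return half + half[::-1]
--
-- def make_diamond_matrix(m, n):
--     """ (int, int) -> Matrix
--     """
--     rp = _pattern(m)
--     cp = _pattern(n)
--     return [[r + c for c in cp] for r in rp]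
-- ===== Notes on version B (the rewrite author's own statement) =====
-- stated objective: alternative
-- what changed: B computes the 1-D palindromic distance pattern for each dimension once and builds every cell as the outer sum rp[i]+cp[j], instead of A's incremental row shifting (map +1 per row) followed by mirror-appending rows.
-- crash fix: For negative even m, A builds an empty row list and then raises IndexError on result.pop(); B returns the empty matrix [] there. — e.g. on make_diamond_matrix(-2, 3): A raises IndexError, B returns []
import Mathlib
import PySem

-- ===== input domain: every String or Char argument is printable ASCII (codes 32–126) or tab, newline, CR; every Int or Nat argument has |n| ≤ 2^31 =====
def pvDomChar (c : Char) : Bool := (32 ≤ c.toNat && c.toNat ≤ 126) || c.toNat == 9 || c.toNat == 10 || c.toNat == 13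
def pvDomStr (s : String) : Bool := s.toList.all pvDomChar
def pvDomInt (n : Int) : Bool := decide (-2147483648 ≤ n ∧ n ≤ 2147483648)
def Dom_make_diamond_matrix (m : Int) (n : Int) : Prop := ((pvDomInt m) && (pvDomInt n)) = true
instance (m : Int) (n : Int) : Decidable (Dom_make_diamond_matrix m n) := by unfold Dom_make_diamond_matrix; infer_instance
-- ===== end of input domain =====

-- B builds each cell as the outer sum of two 1-D palindrome patterns instead of A's
-- incremental row shifting plus mirror-appending; same asymptotic cost (alternative).
-- Pre_ excludes negative even m, on which A raises IndexError (see Raises_ below).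


-- ===== PORT A =====
-- A's local to_add before the loop: the mirrored range ([-2::-1] for odd n, [-1::-1] for even n);
-- slice? with step -1 is never none, so .getD [] is unreachable
def pvToAdd (n : Int) : List Int :=
  if PySem.Int.mod n 2 ≠ 0 then
    PySem.List.pyRange 0 (PySem.Int.floordiv n 2 + 1) 1
      ++ (PySem.List.slice? (PySem.List.pyRange 0 (PySem.Int.floordiv n 2 + 1) 1) (some (-2)) none (-1)).getD []
  else
    PySem.List.pyRange 0 (PySem.Int.floordiv n 2) 1
      ++ (PySem.List.slice? (PySem.List.pyRange 0 (PySem.Int.floordiv n 2) 1) (some (-1)) none (-1)).getD []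

-- A's result after the loop 'for _ in range(m//2+1): result.append(to_add); to_add = list(map(lambda x: x+1, to_add))'
def pvRowsA (m : Int) (n : Int) : List (List Int) :=
  ((PySem.List.pyRange 0 (PySem.Int.floordiv m 2 + 1) 1).foldl
    (fun (st : List (List Int) × List Int) _ =>
      (st.1 ++ [st.2], st.2.map (fun x => x + 1)))
    ([], pvToAdd n)).1

def make_diamond_matrix (m : Int) (n : Int) : List (List Int) :=
  if PySem.Int.mod m 2 = 0 then
    -- result.pop() raises IndexError on an empty result (excluded by Pre_),
    -- then the rows of result[-1::-1] are appended
    match PySem.List.pop? (pvRowsA m n) (-1) with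
    | none => []
    | some (_, res) => res ++ (PySem.List.slice? res (some (-1)) none (-1)).getD []
  else
    pvRowsA m n ++ (PySem.List.slice? (pvRowsA m n) (some (-2)) none (-1)).getD []

-- ===== PORT B =====
def pvPattern (k : Int) : List Int :=
  if PySem.Int.mod k 2 ≠ 0 then
    PySem.List.pyRange 0 (PySem.Int.floordiv k 2 + 1) 1
      ++ (PySem.List.slice? (PySem.List.pyRange 0 (PySem.Int.floordiv k 2 + 1) 1) (some (-2)) none (-1)).getD []
  else
    PySem.List.pyRange 0 (PySem.Int.floordiv k 2) 1
      ++ (PySem.List.slice? (PySem.List.pyRange 0 (PySem.Int.floordiv k 2) 1) none none (-1)).getD []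

def make_diamond_matrix_alt (m : Int) (n : Int) : List (List Int) :=
  (pvPattern m).map (fun r => (pvPattern n).map (fun c => r + c))

-- ===== PRECONDITION & SPEC =====
-- Pre_ excludes only negative even m, on which A raises IndexError (result.pop() of an empty list).
def Pre_make_diamond_matrix (m : Int) (n : Int) : Prop :=
  ¬ (m < 0 ∧ PySem.Int.mod m 2 = 0)
instance (m : Int) (n : Int) : Decidable (Pre_make_diamond_matrix m n) := by
  unfold Pre_make_diamond_matrix; infer_instance

def pvWitness_make_diamond_matrix : Int × Int := (5, 4)

-- For negative even m, A raises IndexError on result.pop() of the empty row list; B returns [].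
def Raises_make_diamond_matrix (m : Int) (n : Int) : Prop :=
  m < 0 ∧ PySem.Int.mod m 2 = 0
instance (m : Int) (n : Int) : Decidable (Raises_make_diamond_matrix m n) := by
  unfold Raises_make_diamond_matrix; infer_instance
def pvRaiseWitness_make_diamond_matrix : Int × Int := (-2, 3)
def pvRaiseWitnessOut_make_diamond_matrix : List (List Int) := []

def Spec_make_diamond_matrix (m : Int) (n : Int) (out : List (List Int)) : Prop :=
  out = make_diamond_matrix_alt m n
instance (m : Int) (n : Int) (out : List (List Int)) : Decidable (Spec_make_diamond_matrix m n out) := by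
  unfold Spec_make_diamond_matrix; infer_instance

-- ===== CLAIM (what is proved, stated in full; the proofs are below) =====
def Claim_equal_make_diamond_matrix : Prop := ∀ (m : Int) (n : Int), Dom_make_diamond_matrix m n → Pre_make_diamond_matrix m n → Spec_make_diamond_matrix m n (make_diamond_matrix m n)
def Claim_raises_make_diamond_matrix : Prop := (∀ (m : Int) (n : Int), Dom_make_diamond_matrix m n → Raises_make_diamond_matrix m n → ¬ Pre_make_diamond_matrix m n) ∧ (Dom_make_diamond_matrix (pvRaiseWitness_make_diamond_matrix.1) (pvRaiseWitness_make_diamond_matrix.2) ∧ Raises_make_diamond_matrix (pvRaiseWitness_make_diamond_matrix.1) (pvRaiseWitness_make_diamond_matrix.2) ∧ make_diamond_matrix_alt (pvRaiseWitness_make_diamond_matrix.1) (pvRaiseWitness_make_diamond_matrix.2) = pvRaiseWitnessOut_make_diamond_matrix)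

-- ===== LEMMAS AND PROOFS =====

-- reversed-index filterMap over a range is a reversed take (core of the step -1 slices)
theorem pv_filterMap_rev {α : Type} : ∀ (j : Nat) (xs : List α), j ≤ xs.length →
    (List.range j).filterMap (fun (k : Nat) => xs[((j : Int) - 1 + (-1) * (k : Int)).toNat]?)
      = (xs.take j).reverse := by
  intro j
  induction j with
  | zero => intro xs _; simp
  | succ j ih =>
    intro xs hle
    match xs, hle with
    | y :: ys, hle =>
      rw [List.range_succ, List.filterMap_append]
      have h2 : (List.filterMap (fun (k : Nat) => (y :: ys)[(((j+1 : Nat) : Int) - 1 + (-1) * (k : Int)).toNat]?) [j]) = [y] := by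
        have h0 : (((j+1 : Nat) : Int) - 1 + (-1) * (j : Int)).toNat = 0 := by push_cast; omega
        simp only [List.filterMap_cons, List.filterMap_nil, h0, List.getElem?_cons_zero]
      rw [h2]
      have h1 : (List.range j).filterMap (fun (k : Nat) => (y :: ys)[(((j+1 : Nat) : Int) - 1 + (-1) * (k : Int)).toNat]?)
          = (List.range j).filterMap (fun (k : Nat) => ys[((j : Int) - 1 + (-1) * (k : Int)).toNat]?) := by
        apply List.filterMap_congr
        intro k hk
        rw [List.mem_range] at hk
        have e1 : (((j+1 : Nat) : Int) - 1 + (-1) * (k : Int)).toNat = ((j : Int) - 1 + (-1) * (k : Int)).toNat + 1 := by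
          push_cast; omega
        rw [e1, List.getElem?_cons_succ]
      rw [h1, ih ys (by simpa using hle)]
      simp

-- xs[-1::-1] is the full reverse
theorem pv_slice_neg_one {α : Type} (xs : List α) :
    PySem.List.slice? xs (some (-1)) none (-1) = some xs.reverse := by
  simp only [PySem.List.slice?, PySem.List.sliceIndices]
  norm_num
  rcases Nat.eq_zero_or_pos xs.length with h | h
  · rw [List.eq_nil_of_length_eq_zero h]; simp
  · rw [if_pos h]
    have hf : (fun (x : Nat) => xs[(-1 + (xs.length : Int) + -(x : Int)).toNat]?)
        = (fun (k : Nat) => xs[((xs.length : Int) - 1 + (-1) * (k : Int)).toNat]?) := by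
      funext k; congr 2; ring
    rw [hf, pv_filterMap_rev xs.length xs le_rfl, List.take_length]

-- xs[-2::-1] is the reverse of all but the last element
theorem pv_slice_neg_two {α : Type} (xs : List α) :
    PySem.List.slice? xs (some (-2)) none (-1) = some xs.dropLast.reverse := by
  simp only [PySem.List.slice?, PySem.List.sliceIndices]
  norm_num
  by_cases h : 1 < xs.length
  · rw [if_pos h]
    have hcnt : (max (-2 + (xs.length : Int)) (-1) + 1).toNat = xs.length - 1 := by omega
    have hf : (fun (x : Nat) => xs[(max (-2 + (xs.length : Int)) (-1) + -(x : Int)).toNat]?)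
        = (fun (k : Nat) => xs[(((xs.length - 1 : Nat) : Int) - 1 + (-1) * (k : Int)).toNat]?) := by
      funext k; congr 2; omega
    rw [hcnt, hf, pv_filterMap_rev (xs.length - 1) xs (by omega), List.dropLast_eq_take]
  · rw [if_neg h]
    match xs, h with
    | [], _ => simp
    | [x], _ => simp
    | x :: y :: t, h => exact absurd (by simp) h

-- A's initial to_add is exactly B's column pattern
theorem pv_toadd_eq (n : Int) : pvToAdd n = pvPattern n := by
  unfold pvToAdd pvPattern
  split
  · rfl
  · rw [pv_slice_neg_one, PySem.List.slice?_none_none_neg_one]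

-- A's loop appends the successively shifted rows
theorem pv_loop (l : List Int) : ∀ (res : List (List Int)) (t : List Int),
    (l.foldl (fun (st : List (List Int) × List Int) _ =>
        (st.1 ++ [st.2], st.2.map (fun x => x + 1))) (res, t)).1
      = res ++ (List.range l.length).map (fun (i : Nat) => t.map (fun x => x + (i : Int))) := by
  induction l with
  | nil => simp
  | cons a l ih =>
    intro res t
    simp only [List.foldl_cons, List.length_cons, List.range_succ_eq_map, List.map_cons,
      List.map_map, ih]
    rw [List.append_assoc, List.singleton_append]
    congr 2
    · simp
    · apply List.map_congr_left
      intro i _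
      simp only [Function.comp_apply]
      apply List.map_congr_left
      intro x _
      simp only [Function.comp_apply]
      push_cast
      ring

-- shifted copies of cp over range q.toNat = B's rows over pyRange 0 q 1
theorem pv_rows_eq (cp : List Int) (q : Int) :
    (List.range q.toNat).map (fun (i : Nat) => cp.map (fun x => x + (i : Int)))
      = (PySem.List.pyRange 0 q 1).map (fun r => cp.map (fun c => r + c)) := by
  rw [PySem.List.pyRange_one, List.map_map]
  rw [show ((q - 0).toNat) = q.toNat by omega]
  apply List.map_congr_left
  intro i _
  simp only [Function.comp_apply]
  apply List.map_congr_left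
  intro x _
  ring

theorem pv_rowsA_eq (m : Int) (n : Int) (h : 0 ≤ m) :
    pvRowsA m n = (List.range ((PySem.Int.floordiv m 2).toNat + 1)).map
      (fun (i : Nat) => (pvPattern n).map (fun x => x + (i : Int))) := by
  unfold pvRowsA
  rw [pv_loop, PySem.List.length_pyRange_one, pv_toadd_eq]
  have hq : 0 ≤ PySem.Int.floordiv m 2 := by
    rw [PySem.Int.floordiv_eq_ediv_of_pos (by norm_num)]; omega
  rw [show (PySem.Int.floordiv m 2 + 1 - 0).toNat = (PySem.Int.floordiv m 2).toNat + 1 by omega]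
  simp

-- ===== VERDICT (by name: the statement is the Claim_ definition above) =====
theorem make_diamond_matrix_raises : Claim_raises_make_diamond_matrix := by
  unfold Claim_raises_make_diamond_matrix
  exact ⟨fun m n _ h hp => hp h, by decide⟩

theorem make_diamond_matrix_spec : Claim_equal_make_diamond_matrix := by
  intro m n hdom hpre
  unfold Spec_make_diamond_matrix make_diamond_matrix make_diamond_matrix_alt
  rcases lt_or_ge m 0 with hm | hm
  · -- m < 0: by Pre_, m is odd; both sides are []
    -- by the raises lemma, a negative even m lies outside Pre_, so m is odd here
    have hodd : PySem.Int.mod m 2 ≠ 0 :=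
      fun h => make_diamond_matrix_raises.1 m n hdom ⟨hm, h⟩ hpre
    have hq : PySem.Int.floordiv m 2 + 1 ≤ 0 := by
      rw [PySem.Int.floordiv_eq_ediv_of_pos (by norm_num)]; omega
    have hrows : pvRowsA m n = [] := by
      unfold pvRowsA
      rw [PySem.List.pyRange_one_eq_nil hq]
      rfl
    have hpat : pvPattern m = [] := by
      unfold pvPattern
      rw [if_pos hodd]
      rw [PySem.List.pyRange_one_eq_nil hq, pv_slice_neg_two]
      rfl
    rw [if_neg hodd, hrows, hpat, pv_slice_neg_two]
    rfl
  · -- 0 ≤ m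
    set q : Int := PySem.Int.floordiv m 2 with hqdef
    have hq0 : 0 ≤ q := by
      rw [hqdef, PySem.Int.floordiv_eq_ediv_of_pos (by norm_num)]; omega
    set cp : List Int := pvPattern n with hcp
    set g : Nat → List Int := fun (i : Nat) => cp.map (fun x => x + (i : Int)) with hg
    have hrows : pvRowsA m n = (List.range (q.toNat + 1)).map g := pv_rowsA_eq m n hm
    by_cases hev : PySem.Int.mod m 2 = 0
    · -- even m: pop the last row, then append the reverse
      rw [if_pos hev]
      have hsplit : pvRowsA m n = (List.range q.toNat).map g ++ [g q.toNat] := by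
        rw [hrows, List.range_succ, List.map_append, List.map_cons, List.map_nil]
      rw [hsplit, PySem.List.pop?_last]
      dsimp only
      rw [pv_slice_neg_one]
      have hpat : pvPattern m = PySem.List.pyRange 0 q 1 ++ (PySem.List.pyRange 0 q 1).reverse := by
        unfold pvPattern
        rw [if_neg (by simpa using hev), PySem.List.slice?_none_none_neg_one]
        rfl
      rw [hpat, List.map_append, List.map_reverse, Option.getD_some, ← pv_rows_eq cp q]
    · -- odd m: append the reverse of all rows but the last
      rw [if_neg hev, hrows, pv_slice_neg_two, Option.getD_some]
      have hpat : pvPattern m = PySem.List.pyRange 0 (q + 1) 1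
          ++ (PySem.List.pyRange 0 (q + 1) 1).dropLast.reverse := by
        unfold pvPattern
        rw [if_pos (by simpa using hev), pv_slice_neg_two]
        rfl
      rw [hpat, List.map_append, List.map_reverse, List.map_dropLast]
      rw [show q.toNat + 1 = (q + 1).toNat by omega, ← pv_rows_eq cp (q + 1)]
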